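-- pv_equiv track=rewrite | github.com/maxHolsch/NarrativeRabbit | backend/src/services/analysis/narrative_gap_analyzer.py | _identify_frame_conflicts
-- ===== SOURCE A (Python) =====
-- def _identify_frame_conflicts(frame_a: str, frame_b: str) -> bool:
--     """
--     Check if two frames are in conflict.
--
--     Args:
--         frame_a: First frame
--         frame_b: Second frame
--
--     Returns:
--         True if frames conflict
--     """
--     opposing_pairs = [
--         ('opportunity', 'threat'),
--         ('tool', 'replacement'),
--         ('partnership', 'replacement'),
--         ('experiment', 'mandate')
--     ]
--
--     for pair in opposing_pairs:
--         if (frame_a in pair and frame_b in pair) and frame_a != frame_b: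
--             return True
--
--     return False
-- ===== SOURCE B (Python) =====
-- _CONFLICTS = {
--     'opportunity': ('threat',),
--     'threat': ('opportunity',),
--     'tool': ('replacement',),
--     'replacement': ('tool', 'partnership'),
--     'partnership': ('replacement',),
--     'experiment': ('mandate',),
--     'mandate': ('experiment',),
-- }
--
--
-- def _identify_frame_conflicts(frame_a: str, frame_b: str) -> bool:
--     return frame_b in _CONFLICTS.get(frame_a, ())
-- ===== Notes on version B (the rewrite author's own statement) =====
-- stated objective: idiomatic
-- what changed: A's loop over an undirected edge list with two tuple-membership tests and an inequality guard per edge is replaced by an adjacency map from each frame to the frames it conflicts with: one keyed lookup and one membership test in the neighbour tuple, with no scan over pairs, no symmetry handling and no a!=b guard.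
import Mathlib
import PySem

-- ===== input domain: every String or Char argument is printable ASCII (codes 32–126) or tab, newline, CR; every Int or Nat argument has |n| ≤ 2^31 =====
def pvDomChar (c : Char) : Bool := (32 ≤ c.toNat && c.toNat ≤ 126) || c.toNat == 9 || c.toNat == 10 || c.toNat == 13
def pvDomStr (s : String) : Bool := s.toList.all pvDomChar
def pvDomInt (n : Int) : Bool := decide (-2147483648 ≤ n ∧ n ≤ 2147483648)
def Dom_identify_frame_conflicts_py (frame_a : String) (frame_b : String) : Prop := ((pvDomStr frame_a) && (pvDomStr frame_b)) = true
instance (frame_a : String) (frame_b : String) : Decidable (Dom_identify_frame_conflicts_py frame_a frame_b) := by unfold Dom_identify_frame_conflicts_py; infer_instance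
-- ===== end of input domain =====

-- B replaces A's scan over an undirected edge list (two membership tests and an a≠b guard per
-- pair) by a precomputed adjacency map frame → conflicting frames, answered with one keyed
-- lookup and one membership test (idiomatic); return values proved equal on all inputs.

-- ===== PORT A =====
def identify_frame_conflicts_py (frame_a : String) (frame_b : String) : Bool :=
  let opposing_pairs : List (String × String) :=
    [("opportunity", "threat"), ("tool", "replacement"),
     ("partnership", "replacement"), ("experiment", "mandate")]
  opposing_pairs.any (fun pair =>
    ((frame_a == pair.1 || frame_a == pair.2) && (frame_b == pair.1 || frame_b == pair.2))
      && !(frame_a == frame_b))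

-- ===== PORT B =====
-- module-level adjacency dict _CONFLICTS (Python tuples of frames become lists)
def pvConflicts : PySem.Dict String (List String) :=
  PySem.Dict.ofList
    [("opportunity", ["threat"]), ("threat", ["opportunity"]),
     ("tool", ["replacement"]), ("replacement", ["tool", "partnership"]),
     ("partnership", ["replacement"]), ("experiment", ["mandate"]),
     ("mandate", ["experiment"])]

def identify_frame_conflicts_py_alt (frame_a : String) (frame_b : String) : Bool :=
  (PySem.Dict.getD pvConflicts frame_a []).contains frame_b

-- ===== PRECONDITION & SPEC =====
def Spec_identify_frame_conflicts_py (frame_a : String) (frame_b : String) (out : Bool) : Prop := out = identify_frame_conflicts_py_alt frame_a frame_b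
instance (frame_a : String) (frame_b : String) (out : Bool) : Decidable (Spec_identify_frame_conflicts_py frame_a frame_b out) := by unfold Spec_identify_frame_conflicts_py; infer_instance

-- ===== CLAIM (what is proved, stated in full; the proofs are below) =====
def Claim_equal_identify_frame_conflicts_py : Prop := ∀ (frame_a : String) (frame_b : String), Dom_identify_frame_conflicts_py frame_a frame_b → Spec_identify_frame_conflicts_py frame_a frame_b (identify_frame_conflicts_py frame_a frame_b)

-- ===== LEMMAS AND PROOFS =====
def pvKeywords : List String :=
  ["opportunity", "threat", "tool", "replacement", "partnership", "experiment", "mandate"]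

-- if frame_a is none of the seven keywords, both sides are false
theorem pvA_out (a b : String) (ha : a ∉ pvKeywords) :
    identify_frame_conflicts_py a b = false := by
  simp only [pvKeywords, List.mem_cons, List.not_mem_nil, or_false, not_or] at ha
  obtain ⟨h1, h2, h3, h4, h5, h6, h7⟩ := ha
  simp [identify_frame_conflicts_py, h1, h2, h3, h4, h5, h6, h7]

theorem pvItems : pvConflicts.items =
    [("opportunity", ["threat"]), ("threat", ["opportunity"]),
     ("tool", ["replacement"]), ("replacement", ["tool", "partnership"]),
     ("partnership", ["replacement"]), ("experiment", ["mandate"]),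
     ("mandate", ["experiment"])] := by decide

theorem pvB_out (a b : String) (ha : a ∉ pvKeywords) :
    identify_frame_conflicts_py_alt a b = false := by
  simp only [pvKeywords, List.mem_cons, List.not_mem_nil, or_false, not_or] at ha
  obtain ⟨h1, h2, h3, h4, h5, h6, h7⟩ := ha
  have e1 := beq_eq_false_iff_ne.mpr (Ne.symm h1)
  have e2 := beq_eq_false_iff_ne.mpr (Ne.symm h2)
  have e3 := beq_eq_false_iff_ne.mpr (Ne.symm h3)
  have e4 := beq_eq_false_iff_ne.mpr (Ne.symm h4)
  have e5 := beq_eq_false_iff_ne.mpr (Ne.symm h5)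
  have e6 := beq_eq_false_iff_ne.mpr (Ne.symm h6)
  have e7 := beq_eq_false_iff_ne.mpr (Ne.symm h7)
  simp [identify_frame_conflicts_py_alt, PySem.Dict.getD, PySem.Dict.get?, pvItems,
    List.find?, e1, e2, e3, e4, e5, e6, e7]

-- if frame_b is none of the seven keywords, both sides are false
theorem pvA_out_b (a b : String) (hb : b ∉ pvKeywords) :
    identify_frame_conflicts_py a b = false := by
  simp only [pvKeywords, List.mem_cons, List.not_mem_nil, or_false, not_or] at hb
  obtain ⟨h1, h2, h3, h4, h5, h6, h7⟩ := hb
  simp [identify_frame_conflicts_py, h1, h2, h3, h4, h5, h6, h7]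

theorem pvB_out_b (a b : String) (hb : b ∉ pvKeywords) :
    identify_frame_conflicts_py_alt a b = false := by
  unfold identify_frame_conflicts_py_alt PySem.Dict.getD PySem.Dict.get?
  cases hf : List.find? (fun p => p.1 == a) pvConflicts.items with
  | none => simp
  | some p =>
    have hp := List.mem_of_find?_eq_some hf
    rw [pvItems] at hp
    simp only [pvKeywords, List.mem_cons, List.not_mem_nil, or_false, not_or] at hb
    simp only [Option.map_some, Option.getD_some]
    fin_cases hp <;> simp_all

-- ===== VERDICT (by name: the statement is the Claim_ definition above) =====
theorem identify_frame_conflicts_py_spec : Claim_equal_identify_frame_conflicts_py := by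
  intro a b _
  unfold Spec_identify_frame_conflicts_py
  by_cases ha : a ∈ pvKeywords
  · by_cases hb : b ∈ pvKeywords
    · fin_cases ha <;> fin_cases hb <;> decide
    · rw [pvA_out_b a b hb, pvB_out_b a b hb]
  · rw [pvA_out a b ha, pvB_out a b ha]
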